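-- pv_equiv track=rewrite | github.com/mifengac/yfjcgkzx | hqzcsj/service/jsxx_service.py | _merge_inferred_types
-- ===== SOURCE A (Python) =====
-- from typing import Any, Dict, List, Optional, Sequence, Tuple
--
-- def _merge_inferred_types(base: Dict[str, str], inc: Dict[str, str]) -> Dict[str, str]:
--     out = dict(base or {})
--     for k, v in (inc or {}).items():
--         if not k:
--             continue
--         cur = out.get(k)
--         if cur == "TEXT":
--             continue
--         if v == "TEXT":
--             out[k] = "TEXT"
--             continue
--         if cur is None:
--             out[k] = v
--     return out
-- ===== SOURCE B (Python) =====
-- def _merge_inferred_types(base, inc):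
--     base = dict(base or {})
--     inc2 = {k: v for k, v in (inc or {}).items() if k}
--     out = {k: ("TEXT" if b == "TEXT" or inc2.get(k) == "TEXT" else b)
--            for k, b in base.items()}
--     for k, v in inc2.items():
--         if k not in base:
--             out[k] = v
--     return out
-- ===== Notes on version B (the rewrite author's own statement) =====
-- stated objective: alternative
-- what changed: Instead of copying base and patching it while looping over inc with four branches, B filters inc's empty keys once, rebuilds every base entry with one uniform rule (TEXT if either side says TEXT, else the base value) and then appends inc's keys missing from base.
import Mathlib
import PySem

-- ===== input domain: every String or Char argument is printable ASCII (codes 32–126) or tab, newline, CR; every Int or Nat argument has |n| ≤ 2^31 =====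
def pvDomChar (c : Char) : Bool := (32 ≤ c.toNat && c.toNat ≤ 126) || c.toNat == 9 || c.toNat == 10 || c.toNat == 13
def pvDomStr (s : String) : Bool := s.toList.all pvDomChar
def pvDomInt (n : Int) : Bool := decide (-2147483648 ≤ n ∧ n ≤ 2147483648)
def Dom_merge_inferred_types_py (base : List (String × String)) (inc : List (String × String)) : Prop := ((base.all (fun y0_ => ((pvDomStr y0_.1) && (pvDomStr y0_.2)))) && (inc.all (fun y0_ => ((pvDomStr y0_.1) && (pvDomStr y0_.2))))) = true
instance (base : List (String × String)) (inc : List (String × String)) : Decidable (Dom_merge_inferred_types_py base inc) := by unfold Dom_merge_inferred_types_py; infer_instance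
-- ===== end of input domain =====

-- B rebuilds the result in one uniform pass over base plus an append of inc's fresh keys,
-- instead of A's copy-then-patch loop; same cost, different decomposition ("alternative").

-- ===== PORT A =====
-- one iteration of A's `for k, v in (inc or {}).items():` body
def mergeStep (out : PySem.Dict String String) (kv : String × String) : PySem.Dict String String :=
  if kv.1 = "" then out
  else if out.get? kv.1 = some "TEXT" then out
  else if kv.2 = "TEXT" then out.insert kv.1 "TEXT"
  else if out.get? kv.1 = none then out.insert kv.1 kv.2
  else out

def merge_inferred_types_py (base : List (String × String)) (inc : List (String × String)) : List (String × String) :=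
  (((PySem.Dict.ofList inc).items).foldl mergeStep (PySem.Dict.ofList base)).items

-- ===== PORT B =====
def merge_inferred_types_py_alt (base : List (String × String)) (inc : List (String × String)) : List (String × String) :=
  let b := PySem.Dict.ofList base
  let inc2 : PySem.Dict String String :=
    PySem.Dict.mk (((PySem.Dict.ofList inc).items).filter (fun kv => kv.1 != ""))
  let out0 : PySem.Dict String String :=
    PySem.Dict.mk (b.items.map (fun kv =>
      (kv.1, if kv.2 = "TEXT" ∨ inc2.get? kv.1 = some "TEXT" then "TEXT" else kv.2)))
  (inc2.items.foldl (fun out kv => if b.contains kv.1 then out else out.insert kv.1 kv.2) out0).items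

-- ===== PRECONDITION & SPEC =====
def Spec_merge_inferred_types_py (base : List (String × String)) (inc : List (String × String)) (out : List (String × String)) : Prop := out = merge_inferred_types_py_alt base inc
instance (base : List (String × String)) (inc : List (String × String)) (out : List (String × String)) : Decidable (Spec_merge_inferred_types_py base inc out) := by unfold Spec_merge_inferred_types_py; infer_instance

-- ===== CLAIM (what is proved, stated in full; the proofs are below) =====
def Claim_equal_merge_inferred_types_py : Prop := ∀ (base : List (String × String)) (inc : List (String × String)), Dom_merge_inferred_types_py base inc → Spec_merge_inferred_types_py base inc (merge_inferred_types_py base inc)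

-- ===== LEMMAS AND PROOFS =====

-- the dict B builds from inc's non-empty-key items (used to state the patch rule)
def pvIncDict (l : List (String × String)) : PySem.Dict String String :=
  PySem.Dict.mk (l.filter (fun kv => kv.1 != ""))

-- the uniform value rule B applies to every base item
def pvPatch (l : List (String × String)) (kv : String × String) : String × String :=
  (kv.1, if kv.2 = "TEXT" ∨ (pvIncDict l).get? kv.1 = some "TEXT" then "TEXT" else kv.2)

theorem pvIncDict_get?_none (t : List (String × String)) (k : String)
    (hk : k ∉ t.map Prod.fst) : (pvIncDict t).get? k = none := by
  rw [PySem.Dict.get?_eq_none_iff_not_mem_keys]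
  intro hmem
  simp only [pvIncDict, PySem.Dict.keys_mk, List.mem_map, List.mem_filter] at hmem
  obtain ⟨kv, ⟨hkv, _⟩, hfst⟩ := hmem
  exact hk (List.mem_map.mpr ⟨kv, hkv, hfst⟩)

theorem pvIncDict_get?_cons (k v : String) (t : List (String × String)) (x : String)
    (hk : k ≠ "") :
    (pvIncDict ((k, v) :: t)).get? x = if k == x then some v else (pvIncDict t).get? x := by
  unfold pvIncDict
  rw [List.filter_cons_of_pos (by simpa using hk)]
  exact PySem.Dict.get?_mk_cons k v _ x

-- A's fold over inc's items, characterised by B's two-part shape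
theorem pvFoldA (l : List (String × String)) (d : PySem.Dict String String)
    (hd : d.keys.Nodup) (hl : (l.map Prod.fst).Nodup) :
    (l.foldl mergeStep d).items =
      d.items.map (pvPatch l)
        ++ l.filter (fun kv => kv.1 != "" && !d.contains kv.1) := by
  induction l generalizing d with
  | nil =>
    simp only [List.foldl_nil, List.filter_nil, List.append_nil]
    have : d.items.map (pvPatch []) = d.items.map id := by
      refine List.map_congr_left (fun kv _ => ?_)
      obtain ⟨k1, k2⟩ := kv
      have h0 : (pvIncDict []).get? k1 = none := pvIncDict_get?_none [] k1 (by simp)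
      simp only [pvPatch, h0]
      by_cases h : k2 = "TEXT" <;> simp [h]
    rw [this, List.map_id]
  | cons kv t ih =>
    obtain ⟨k, v⟩ := kv
    simp only [List.map_cons, List.nodup_cons] at hl
    obtain ⟨hknot, hlt⟩ := hl
    simp only [List.foldl_cons]
    by_cases hk : k = ""
    · -- empty key: skipped by A, dropped by B's filter
      have hstep : mergeStep d (k, v) = d := by simp [mergeStep, hk]
      rw [hstep, ih d hd hlt]
      have hmap : d.items.map (pvPatch t) = d.items.map (pvPatch ((k, v) :: t)) := by
        refine List.map_congr_left (fun kv' _ => ?_)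
        have : pvIncDict ((k, v) :: t) = pvIncDict t := by
          unfold pvIncDict
          rw [List.filter_cons_of_neg (by simp [hk])]
        simp [pvPatch, this]
      rw [hmap, List.filter_cons_of_neg (by simp [hk])]
    · by_cases hT : d.get? k = some "TEXT"
      · -- base already says TEXT: A skips
        have hstep : mergeStep d (k, v) = d := by simp [mergeStep, hk, hT]
        have hc : d.contains k = true := by
          rw [PySem.Dict.contains_eq_isSome_get?, hT]; rfl
        rw [hstep, ih d hd hlt]
        have hmap : d.items.map (pvPatch t) = d.items.map (pvPatch ((k, v) :: t)) := by
          refine List.map_congr_left (fun kv' hmem => ?_)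
          by_cases hx : kv'.1 = k
          · have : d.get? kv'.1 = some kv'.2 := by
              have := PySem.Dict.get?_of_mem_items (d := d) (by simpa using hmem) hd
              simpa using this
            rw [hx, hT] at this
            have h2 : kv'.2 = "TEXT" := by injection this.symm
            simp [pvPatch, h2]
          · have hl2 := pvIncDict_get?_cons k v t kv'.1 hk
            simp only [show (k == kv'.1) = false by simp [Ne.symm hx]] at hl2
            simp [pvPatch, hl2]
        rw [hmap, List.filter_cons_of_neg (by simp [hc])]
      · -- A patches/extends; split on whether k is a base key
        by_cases hc : d.contains k = true
        · -- existing key, value not TEXT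
          have hb : ∃ b, d.get? k = some b ∧ b ≠ "TEXT" := by
            rw [PySem.Dict.contains_eq_isSome_get?] at hc
            rcases h : d.get? k with _ | b
            · rw [h] at hc; simp at hc
            · exact ⟨b, rfl, by rintro rfl; exact hT h⟩
          obtain ⟨b, hbv, hbT⟩ := hb
          by_cases hv : v = "TEXT"
          · -- inc says TEXT: A overwrites in place
            subst hv
            have hstep : mergeStep d (k, "TEXT") = d.insert k "TEXT" := by
              simp [mergeStep, hk, hT]
            rw [hstep, ih _ (PySem.Dict.nodup_keys_insert d k "TEXT" hd) hlt]
            rw [PySem.Dict.items_insert_of_contains d "TEXT" hc, List.map_map]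
            congr 1
            · refine List.map_congr_left (fun kv' hmem => ?_)
              by_cases hx : kv'.1 = k
              · have hl2 : (pvIncDict ((k, "TEXT") :: t)).get? kv'.1 = some "TEXT" := by
                  rw [pvIncDict_get?_cons k "TEXT" t kv'.1 hk]
                  simp [hx]
                rw [hx] at hl2
                simp [pvPatch, Function.comp, hx, hl2]
              · have hl2 := pvIncDict_get?_cons k "TEXT" t kv'.1 hk
                simp only [show (k == kv'.1) = false by simp [Ne.symm hx]] at hl2
                simp [pvPatch, Function.comp, show (kv'.1 == k) = false by simp [hx], hl2]
            · rw [List.filter_cons_of_neg (by simp [hc])]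
              refine List.filter_congr (fun kv' hmem => ?_)
              have hx : kv'.1 ≠ k := by
                intro h; exact hknot (h ▸ List.mem_map.mpr ⟨kv', hmem, rfl⟩)
              rw [PySem.Dict.contains_insert]
              simp [show (kv'.1 == k) = false by simp [hx]]
          · -- neither side TEXT: A keeps the base value
            have hstep : mergeStep d (k, v) = d := by
              simp [mergeStep, hk, hbv, hbT, hv]
            rw [hstep, ih d hd hlt]
            have hmap : d.items.map (pvPatch t) = d.items.map (pvPatch ((k, v) :: t)) := by
              refine List.map_congr_left (fun kv' hmem => ?_)
              by_cases hx : kv'.1 = k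
              · have h2 : kv'.2 = b := by
                  have := PySem.Dict.get?_of_mem_items (d := d) (by simpa using hmem) hd
                  rw [hx, hbv] at this
                  injection this.symm
                have hnone : (pvIncDict t).get? kv'.1 = none := by
                  refine pvIncDict_get?_none t kv'.1 (by rwa [hx])
                have hsome : (pvIncDict ((k, v) :: t)).get? kv'.1 = some v := by
                  rw [pvIncDict_get?_cons k v t kv'.1 hk]; simp [hx]
                simp [pvPatch, hnone, hsome, h2, hbT, hv]
              · have hl2 := pvIncDict_get?_cons k v t kv'.1 hk
                simp only [show (k == kv'.1) = false by simp [Ne.symm hx]] at hl2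
                simp [pvPatch, hl2]
            rw [hmap, List.filter_cons_of_neg (by simp [hc])]
        · -- fresh key: A appends (k, v) (as "TEXT" when v is TEXT, i.e. v itself)
          have hcf : d.contains k = false := by simpa using hc
          have hn : d.get? k = none := by
            rw [PySem.Dict.contains_eq_isSome_get?] at hcf
            rcases h : d.get? k with _ | b
            · rfl
            · rw [h] at hcf; simp at hcf
          have hstep : mergeStep d (k, v) = d.insert k v := by
            by_cases hv : v = "TEXT"
            · subst hv; simp [mergeStep, hk, hT]
            · simp [mergeStep, hk, hv, hn]
          rw [hstep, ih _ (PySem.Dict.nodup_keys_insert d k v hd) hlt]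
          rw [PySem.Dict.items_insert_of_not_contains d v hcf, List.map_append]
          have hknotd : ∀ kv' ∈ d.items, kv'.1 ≠ k := by
            intro kv' hmem h
            have : kv'.1 ∈ d.keys := PySem.Dict.mem_keys_of_mem_items d hmem
            rw [PySem.Dict.contains_eq_decide_mem_keys] at hcf
            rw [h] at this
            simp [this] at hcf
          have hmap : d.items.map (pvPatch t) = d.items.map (pvPatch ((k, v) :: t)) := by
            refine List.map_congr_left (fun kv' hmem => ?_)
            have hl2 := pvIncDict_get?_cons k v t kv'.1 hk
            simp only [show (k == kv'.1) = false by simp [Ne.symm (hknotd kv' hmem)]] at hl2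
            simp [pvPatch, hl2]
          have hsingle : [(k, v)].map (pvPatch t) = [(k, v)] := by
            have hnone : (pvIncDict t).get? k = none := pvIncDict_get?_none t k hknot
            by_cases hv : v = "TEXT" <;> simp [pvPatch, hnone, hv]
          have hfilt : t.filter (fun kv' => kv'.1 != "" && !(d.insert k v).contains kv'.1)
              = t.filter (fun kv' => kv'.1 != "" && !d.contains kv'.1) := by
            refine List.filter_congr (fun kv' hmem => ?_)
            have hx : kv'.1 ≠ k := by
              intro h; exact hknot (h ▸ List.mem_map.mpr ⟨kv', hmem, rfl⟩)
            rw [PySem.Dict.contains_insert]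
            simp [show (kv'.1 == k) = false by simp [hx]]
          rw [hmap, hsingle, hfilt, List.filter_cons_of_pos (by simp [hk, hcf])]
          simp [List.append_assoc]

-- B's append loop over inc2: each surviving key is fresh, so the items just append
theorem pvFoldB (b : PySem.Dict String String) (l : List (String × String))
    (out0 : PySem.Dict String String) (hl : (l.map Prod.fst).Nodup)
    (h : ∀ kv ∈ l, out0.contains kv.1 = b.contains kv.1) :
    (l.foldl (fun out kv => if b.contains kv.1 then out else out.insert kv.1 kv.2) out0).items
      = out0.items ++ l.filter (fun kv => !b.contains kv.1) := by
  induction l generalizing out0 with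
  | nil => simp
  | cons kv t ih =>
    obtain ⟨k, v⟩ := kv
    simp only [List.map_cons, List.nodup_cons] at hl
    obtain ⟨hknot, hlt⟩ := hl
    simp only [List.foldl_cons]
    by_cases hb : b.contains k = true
    · rw [if_pos hb, ih out0 hlt (fun kv' hm => h kv' (List.mem_cons_of_mem _ hm))]
      rw [List.filter_cons_of_neg (by simp [hb])]
    · have hbf : b.contains k = false := by simpa using hb
      have h0 : out0.contains k = false := by
        rw [h (k, v) List.mem_cons_self]; exact hbf
      rw [if_neg (by simp [hbf])]
      rw [ih (out0.insert k v) hlt ?_]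
      · rw [PySem.Dict.items_insert_of_not_contains out0 v h0,
          List.filter_cons_of_pos (by simp [hbf]), List.append_assoc]
        rfl
      · intro kv' hm
        have hx : kv'.1 ≠ k := by
          intro heq; exact hknot (heq ▸ List.mem_map.mpr ⟨kv', hm, rfl⟩)
        rw [PySem.Dict.contains_insert]
        simp only [show (kv'.1 == k) = false by simp [hx], Bool.false_or]
        exact h kv' (List.mem_cons_of_mem _ hm)

-- ===== VERDICT (by name: the statement is the Claim_ definition above) =====
theorem merge_inferred_types_py_spec : Claim_equal_merge_inferred_types_py := by
  intro base inc _
  unfold Spec_merge_inferred_types_py merge_inferred_types_py merge_inferred_types_py_alt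
  set b := PySem.Dict.ofList base with hb
  set L := (PySem.Dict.ofList inc).items with hL
  have hbn : b.keys.Nodup := PySem.Dict.nodup_keys_ofList base
  have hLn : (L.map Prod.fst).Nodup := by
    have := PySem.Dict.nodup_keys_ofList inc
    simpa [PySem.Dict.keys] using this
  have hLn2 : ((L.filter (fun kv => kv.1 != "")).map Prod.fst).Nodup :=
    hLn.sublist ((List.filter_sublist).map Prod.fst)
  rw [pvFoldA L b hbn hLn]
  rw [pvFoldB b (L.filter (fun kv => kv.1 != ""))
      (PySem.Dict.mk (b.items.map (fun kv =>
        (kv.1, if kv.2 = "TEXT" ∨ (PySem.Dict.mk (L.filter (fun kv => kv.1 != ""))).get? kv.1 = some "TEXT" then "TEXT" else kv.2))))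
      hLn2 ?_]
  · congr 1
    rw [List.filter_filter]
    refine List.filter_congr (fun kv' _ => ?_)
    exact Bool.and_comm _ _
  · intro kv' _
    rw [PySem.Dict.contains_eq_decide_mem_keys, PySem.Dict.contains_eq_decide_mem_keys]
    congr 1
    simp [PySem.Dict.keys]
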